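-- pv_equiv track=rewrite | github.com/heygoodgame/crossword-generator | src/crossword_generator/grid_pattern_generator.py | _find_min_word_length
-- ===== SOURCE A (Python) =====
-- def _find_min_word_length(
--     rows: int, cols: int, black: set[tuple[int, int]]
-- ) -> int:
--     """Find the minimum word slot length in the grid."""
--     min_len = max(rows, cols)  # Start with max possible
--
--     for r in range(rows):
--         length = 0
--         for c in range(cols):
--             if (r, c) in black:
--                 if length > 0:
--                     min_len = min(min_len, length)
--                 length = 0
--             else:
--                 length += 1
--         if length > 0:
--             min_len = min(min_len, length)
--
--     for c in range(cols):
--         length = 0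
--         for r in range(rows):
--             if (r, c) in black:
--                 if length > 0:
--                     min_len = min(min_len, length)
--                 length = 0
--             else:
--                 length += 1
--         if length > 0:
--             min_len = min(min_len, length)
--
--     return min_len
-- ===== SOURCE B (Python) =====
-- def _find_min_word_length(
--     rows: int, cols: int, black: set[tuple[int, int]]
-- ) -> int:
--     """Find the minimum word slot length in the grid."""
--     min_len = max(rows, cols)
--
--     by_row: dict[int, set[int]] = {}
--     by_col: dict[int, set[int]] = {}
--     for r, c in black:
--         if 0 <= r < rows and 0 <= c < cols:
--             by_row.setdefault(r, set()).add(c)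
--             by_col.setdefault(c, set()).add(r)
--
--     for r in range(rows):
--         prev = -1
--         for c in sorted(by_row.get(r, ())):
--             gap = c - prev - 1
--             if gap > 0:
--                 min_len = min(min_len, gap)
--             prev = c
--         gap = cols - prev - 1
--         if gap > 0:
--             min_len = min(min_len, gap)
--
--     for c in range(cols):
--         prev = -1
--         for r in sorted(by_col.get(c, ())):
--             gap = r - prev - 1
--             if gap > 0:
--                 min_len = min(min_len, gap)
--             prev = r
--         gap = rows - prev - 1
--         if gap > 0:
--             min_len = min(min_len, gap)
--
--     return min_len
-- ===== Notes on version B (the rewrite author's own statement) =====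
-- stated objective: faster
-- what changed: Instead of scanning every cell of every row and column while tracking the current run length, B buckets the in-range black cells by row and by column in one pass over the set, then derives each line's white-run lengths as gaps between consecutive sorted black positions (and the line borders).
import Mathlib
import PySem

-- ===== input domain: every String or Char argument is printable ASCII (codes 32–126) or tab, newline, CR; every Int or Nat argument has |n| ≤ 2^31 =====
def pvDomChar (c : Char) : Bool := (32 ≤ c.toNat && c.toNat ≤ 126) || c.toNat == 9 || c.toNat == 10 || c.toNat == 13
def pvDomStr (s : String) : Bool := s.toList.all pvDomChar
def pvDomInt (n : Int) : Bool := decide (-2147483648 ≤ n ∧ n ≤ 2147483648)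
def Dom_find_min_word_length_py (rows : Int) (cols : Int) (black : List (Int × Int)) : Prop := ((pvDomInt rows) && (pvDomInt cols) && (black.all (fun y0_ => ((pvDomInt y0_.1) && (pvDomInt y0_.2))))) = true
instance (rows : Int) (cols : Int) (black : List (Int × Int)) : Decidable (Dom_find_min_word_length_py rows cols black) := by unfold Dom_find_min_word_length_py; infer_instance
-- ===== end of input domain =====

-- B groups the black cells by row and by column once and takes gaps between consecutive
-- sorted black positions per line, instead of A's cell-by-cell scan of the whole grid.

-- ===== PORT A =====
-- A's inner line scan ('length'/'min_len' loop); the identical Python code appears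
-- once for rows and once for columns, with P c = '(r, c) in black' resp. P r = '(r, c) in black'.
def pvScanA (P : Int → Bool) (n : Int) (m : Int) : Int :=
  let st := (PySem.List.pyRange 0 n).foldl (fun (st : Int × Int) c =>
    if P c then (0, if st.1 > 0 then min st.2 st.1 else st.2)
    else (st.1 + 1, st.2)) (0, m)
  if st.1 > 0 then min st.2 st.1 else st.2

def find_min_word_length_py (rows : Int) (cols : Int) (black : List (Int × Int)) : Int :=
  let m0 := max rows cols
  let m1 := (PySem.List.pyRange 0 rows).foldl (fun m r =>
    pvScanA (fun c => PySem.Set.contains black (r, c)) cols m) m0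
  (PySem.List.pyRange 0 cols).foldl (fun m c =>
    pvScanA (fun r => PySem.Set.contains black (r, c)) rows m) m1

-- ===== PORT B =====
-- B's per-line gap scan: 'prev'/'min_len' over the sorted black positions of one line.
def pvScanB (ps : List Int) (n : Int) (m : Int) : Int :=
  let st := ps.foldl (fun (st : Int × Int) c =>
    (c, if c - st.1 - 1 > 0 then min st.2 (c - st.1 - 1) else st.2)) (-1, m)
  if n - st.1 - 1 > 0 then min st.2 (n - st.1 - 1) else st.2

def find_min_word_length_py_alt (rows : Int) (cols : Int) (black : List (Int × Int)) : Int :=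
  let m0 := max rows cols
  -- 'for r, c in black: if in range: by_row.setdefault(r, set()).add(c); by_col…'
  let grp := black.foldl (fun (d : PySem.Dict Int (PySem.Set Int) × PySem.Dict Int (PySem.Set Int)) rc =>
      if 0 ≤ rc.1 ∧ rc.1 < rows ∧ 0 ≤ rc.2 ∧ rc.2 < cols then
        (d.1.modify rc.1 PySem.Set.empty (fun s => s.add rc.2),
         d.2.modify rc.2 PySem.Set.empty (fun s => s.add rc.1))
      else d) (PySem.Dict.empty, PySem.Dict.empty)
  let m1 := (PySem.List.pyRange 0 rows).foldl (fun m r =>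
      pvScanB (PySem.List.sorted (grp.1.getD r PySem.Set.empty) (fun x => x)) cols m) m0
  (PySem.List.pyRange 0 cols).foldl (fun m c =>
      pvScanB (PySem.List.sorted (grp.2.getD c PySem.Set.empty) (fun x => x)) rows m) m1

-- ===== PRECONDITION & SPEC =====
def Spec_find_min_word_length_py (rows : Int) (cols : Int) (black : List (Int × Int)) (out : Int) : Prop := out = find_min_word_length_py_alt rows cols black
instance (rows : Int) (cols : Int) (black : List (Int × Int)) (out : Int) : Decidable (Spec_find_min_word_length_py rows cols black out) := by unfold Spec_find_min_word_length_py; infer_instance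

-- ===== CLAIM (what is proved, stated in full; the proofs are below) =====
def Claim_equal_find_min_word_length_py : Prop := ∀ (rows : Int) (cols : Int) (black : List (Int × Int)), Dom_find_min_word_length_py rows cols black → Spec_find_min_word_length_py rows cols black (find_min_word_length_py rows cols black)

-- ===== LEMMAS AND PROOFS =====

-- A's stateful scan of positions a..a+k-1 (state: current run length, running min) equals
-- B's gap scan over the black positions among them (state: previous black, running min).
lemma pvCore (P : Int → Bool) (k : Nat) : ∀ (a len m : Int),
    (PySem.List.pyRange a (a + k)).foldl (fun (st : Int × Int) c =>
      if P c then (0, if st.1 > 0 then min st.2 st.1 else st.2)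
      else (st.1 + 1, st.2)) (len, m)
    = ((a + (k : Int)) -
        (((PySem.List.pyRange a (a + k)).filter P).foldl (fun (st : Int × Int) c =>
          (c, if c - st.1 - 1 > 0 then min st.2 (c - st.1 - 1) else st.2)) (a - len - 1, m)).1 - 1,
        (((PySem.List.pyRange a (a + k)).filter P).foldl (fun (st : Int × Int) c =>
          (c, if c - st.1 - 1 > 0 then min st.2 (c - st.1 - 1) else st.2)) (a - len - 1, m)).2) := by
  induction k with
  | zero =>
    intro a len m
    rw [PySem.List.pyRange_one_eq_nil (by omega)]
    simp only [List.filter_nil, List.foldl_nil, Nat.cast_zero, Prod.mk.injEq]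
    norm_num
    omega
  | succ k ih =>
    intro a len m
    rw [PySem.List.pyRange_one_cons (by push_cast; omega),
        show a + ((k : Nat) + 1 : Nat) = (a + 1) + (k : Nat) by push_cast; ring]
    by_cases hP : P a
    · simp only [List.filter_cons, hP, if_true, List.foldl_cons,
        show a - (a - len - 1) - 1 = len by ring]
      rw [ih (a + 1) 0 (if len > 0 then min m len else m),
          show (a + 1) - 0 - 1 = a by ring]
    · simp only [List.filter_cons, hP, if_false, Bool.false_eq_true, List.foldl_cons]
      rw [ih (a + 1) (len + 1) m,
          show (a + 1) - (len + 1) - 1 = a - len - 1 by ring]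

lemma pvScan_eq (P : Int → Bool) (n m : Int) :
    pvScanA P n m = pvScanB ((PySem.List.pyRange 0 n).filter P) n m := by
  unfold pvScanA pvScanB
  by_cases h : n ≤ 0
  · rw [PySem.List.pyRange_one_eq_nil h]
    simp only [List.filter_nil, List.foldl_nil]
    rw [if_neg (by omega), if_neg (by omega)]
  · push Not at h
    have hc := pvCore P n.toNat 0 0 m
    rw [show (0:Int) + (n.toNat : Int) = n by omega] at hc
    simp only [hc, show (0:Int) - 0 - 1 = -1 by ring]

-- membership in a value of the grouping dict built by B's first loop
lemma pvGrp_mem (cond : Int × Int → Prop) [DecidablePred cond] (key val : Int × Int → Int)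
    (l : List (Int × Int)) : ∀ (d : PySem.Dict Int (PySem.Set Int)) (x y : Int),
    (y ∈ (l.foldl (fun d rc => if cond rc then
        d.modify (key rc) PySem.Set.empty (fun s => s.add (val rc)) else d) d).getD x PySem.Set.empty
      ↔ y ∈ d.getD x PySem.Set.empty ∨ ∃ rc ∈ l, cond rc ∧ key rc = x ∧ val rc = y) := by
  induction l with
  | nil => simp
  | cons rc t ih =>
    intro d x y
    simp only [List.foldl_cons, List.mem_cons]
    rw [ih]
    by_cases hc : cond rc
    · rw [if_pos hc, PySem.Dict.getD_modify]
      by_cases hx : x = key rc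
      · subst hx
        rw [if_pos rfl, PySem.Set.mem_add]
        aesop
      · rw [if_neg hx]
        aesop
    · rw [if_neg hc]
      aesop

lemma pvGrp_nodup (cond : Int × Int → Prop) [DecidablePred cond] (key val : Int × Int → Int)
    (l : List (Int × Int)) : ∀ (d : PySem.Dict Int (PySem.Set Int)),
    (∀ x, (d.getD x PySem.Set.empty).Nodup) → ∀ x,
    ((l.foldl (fun d rc => if cond rc then
        d.modify (key rc) PySem.Set.empty (fun s => s.add (val rc)) else d) d).getD x PySem.Set.empty).Nodup := by
  induction l with
  | nil => intro d hd x; simpa using hd x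
  | cons rc t ih =>
    intro d hd x
    simp only [List.foldl_cons]
    apply ih
    intro z
    by_cases hc : cond rc
    · rw [if_pos hc, PySem.Dict.getD_modify]
      by_cases hz : z = key rc
      · rw [if_pos hz]; exact PySem.Set.nodup_add _ _ (hd _)
      · rw [if_neg hz]; exact hd z
    · rw [if_neg hc]; exact hd z

-- a Nodup list with exactly the members of 'filter P (range n)' sorts to that filter
lemma pvSorted_eq (S : List Int) (hnd : S.Nodup) (n : Int) (P : Int → Bool)
    (hm : ∀ y, y ∈ S ↔ (P y = true ∧ 0 ≤ y ∧ y < n)) :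
    PySem.List.sorted S (fun x => x) = (PySem.List.pyRange 0 n).filter P := by
  apply PySem.List.eq_of_perm_of_pairwise_le_of_injective (fun x => x) (fun a b h => h)
  · have h1 : (PySem.List.sorted S (fun x => x)).Perm S := PySem.List.sorted_perm S _ _
    refine h1.trans ?_
    rw [List.perm_ext_iff_of_nodup hnd ((PySem.List.pairwise_lt_pyRange_one 0 n).filter P).nodup]
    intro y
    rw [hm y, List.mem_filter, PySem.List.mem_pyRange_one]
    tauto
  · exact PySem.List.sorted_pairwise S _
  · exact ((PySem.List.pairwise_lt_pyRange_one 0 n).filter P).imp (fun h => le_of_lt h)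

-- ===== VERDICT (by name: the statement is the Claim_ definition above) =====
theorem find_min_word_length_py_spec : Claim_equal_find_min_word_length_py := by
  intro rows cols black _
  unfold Spec_find_min_word_length_py find_min_word_length_py find_min_word_length_py_alt
  simp only
  have hgrp : black.foldl (fun (d : PySem.Dict Int (PySem.Set Int) × PySem.Dict Int (PySem.Set Int)) rc =>
      if 0 ≤ rc.1 ∧ rc.1 < rows ∧ 0 ≤ rc.2 ∧ rc.2 < cols then
        (d.1.modify rc.1 PySem.Set.empty (fun s => s.add rc.2),
         d.2.modify rc.2 PySem.Set.empty (fun s => s.add rc.1))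
      else d) (PySem.Dict.empty, PySem.Dict.empty)
      = (black.foldl (fun (e : PySem.Dict Int (PySem.Set Int)) (rc : Int × Int) =>
            if 0 ≤ rc.1 ∧ rc.1 < rows ∧ 0 ≤ rc.2 ∧ rc.2 < cols then
              e.modify rc.1 PySem.Set.empty (fun s => s.add rc.2) else e) PySem.Dict.empty,
         black.foldl (fun (e : PySem.Dict Int (PySem.Set Int)) (rc : Int × Int) =>
            if 0 ≤ rc.1 ∧ rc.1 < rows ∧ 0 ≤ rc.2 ∧ rc.2 < cols then
              e.modify rc.2 PySem.Set.empty (fun s => s.add rc.1) else e) PySem.Dict.empty) := by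
    have hstep : (fun (d : PySem.Dict Int (PySem.Set Int) × PySem.Dict Int (PySem.Set Int)) (rc : Int × Int) =>
        if 0 ≤ rc.1 ∧ rc.1 < rows ∧ 0 ≤ rc.2 ∧ rc.2 < cols then
          (d.1.modify rc.1 PySem.Set.empty (fun s => s.add rc.2),
           d.2.modify rc.2 PySem.Set.empty (fun s => s.add rc.1))
        else d)
      = (fun d rc =>
          ((fun (e : PySem.Dict Int (PySem.Set Int)) (rc : Int × Int) =>
            if 0 ≤ rc.1 ∧ rc.1 < rows ∧ 0 ≤ rc.2 ∧ rc.2 < cols then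
              e.modify rc.1 PySem.Set.empty (fun s => s.add rc.2) else e) d.1 rc,
           (fun (e : PySem.Dict Int (PySem.Set Int)) (rc : Int × Int) =>
            if 0 ≤ rc.1 ∧ rc.1 < rows ∧ 0 ≤ rc.2 ∧ rc.2 < cols then
              e.modify rc.2 PySem.Set.empty (fun s => s.add rc.1) else e) d.2 rc)) := by
      funext d rc
      beta_reduce
      split_ifs <;> rfl
    rw [hstep]
    exact PySem.List.foldl_prod_mk
      (f := fun (e : PySem.Dict Int (PySem.Set Int)) (rc : Int × Int) =>
        if 0 ≤ rc.1 ∧ rc.1 < rows ∧ 0 ≤ rc.2 ∧ rc.2 < cols then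
          e.modify rc.1 PySem.Set.empty (fun s => s.add rc.2) else e)
      (g := fun (e : PySem.Dict Int (PySem.Set Int)) (rc : Int × Int) =>
        if 0 ≤ rc.1 ∧ rc.1 < rows ∧ 0 ≤ rc.2 ∧ rc.2 < cols then
          e.modify rc.2 PySem.Set.empty (fun s => s.add rc.1) else e)
      black PySem.Dict.empty PySem.Dict.empty
  rw [hgrp]
  simp only
  have hrow : ∀ (m r : Int), r ∈ PySem.List.pyRange 0 rows →
      pvScanA (fun c => PySem.Set.contains black (r, c)) cols m
      = pvScanB (PySem.List.sorted
          ((black.foldl (fun (e : PySem.Dict Int (PySem.Set Int)) (rc : Int × Int) =>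
            if 0 ≤ rc.1 ∧ rc.1 < rows ∧ 0 ≤ rc.2 ∧ rc.2 < cols then
              e.modify rc.1 PySem.Set.empty (fun s => s.add rc.2) else e) PySem.Dict.empty).getD r
            PySem.Set.empty) (fun x => x)) cols m := by
    intro m r hr
    rw [PySem.List.mem_pyRange_one] at hr
    rw [pvScan_eq]
    congr 1
    refine (pvSorted_eq _ ?_ cols _ ?_).symm
    · exact pvGrp_nodup (fun rc => 0 ≤ rc.1 ∧ rc.1 < rows ∧ 0 ≤ rc.2 ∧ rc.2 < cols)
        (fun rc => rc.1) (fun rc => rc.2) black PySem.Dict.empty (by intro x; simp [PySem.Dict.getD_empty, PySem.Set.empty]) r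
    · intro y
      rw [pvGrp_mem (fun rc => 0 ≤ rc.1 ∧ rc.1 < rows ∧ 0 ≤ rc.2 ∧ rc.2 < cols)
        (fun rc => rc.1) (fun rc => rc.2) black PySem.Dict.empty r y]
      simp only [PySem.Dict.getD_empty]
      constructor
      · rintro (h | ⟨rc, hmem, hcond, h1, h2⟩)
        · simp [PySem.Set.empty] at h
        · have heq : rc = (r, y) := Prod.ext h1 h2
          subst heq
          exact ⟨(PySem.Set.contains_iff _ _).mpr hmem, hcond.2.2⟩
      · rintro ⟨hP, hy⟩
        exact Or.inr ⟨(r, y), (PySem.Set.contains_iff _ _).mp hP, ⟨hr.1, hr.2, hy⟩, rfl, rfl⟩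
  have hcol : ∀ (m c : Int), c ∈ PySem.List.pyRange 0 cols →
      pvScanA (fun r => PySem.Set.contains black (r, c)) rows m
      = pvScanB (PySem.List.sorted
          ((black.foldl (fun (e : PySem.Dict Int (PySem.Set Int)) (rc : Int × Int) =>
            if 0 ≤ rc.1 ∧ rc.1 < rows ∧ 0 ≤ rc.2 ∧ rc.2 < cols then
              e.modify rc.2 PySem.Set.empty (fun s => s.add rc.1) else e) PySem.Dict.empty).getD c
            PySem.Set.empty) (fun x => x)) rows m := by
    intro m c hc
    rw [PySem.List.mem_pyRange_one] at hc
    rw [pvScan_eq]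
    congr 1
    refine (pvSorted_eq _ ?_ rows _ ?_).symm
    · exact pvGrp_nodup (fun rc => 0 ≤ rc.1 ∧ rc.1 < rows ∧ 0 ≤ rc.2 ∧ rc.2 < cols)
        (fun rc => rc.2) (fun rc => rc.1) black PySem.Dict.empty (by intro x; simp [PySem.Dict.getD_empty, PySem.Set.empty]) c
    · intro y
      rw [pvGrp_mem (fun rc => 0 ≤ rc.1 ∧ rc.1 < rows ∧ 0 ≤ rc.2 ∧ rc.2 < cols)
        (fun rc => rc.2) (fun rc => rc.1) black PySem.Dict.empty c y]
      simp only [PySem.Dict.getD_empty]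
      constructor
      · rintro (h | ⟨rc, hmem, hcond, h1, h2⟩)
        · simp [PySem.Set.empty] at h
        · have heq : rc = (y, c) := Prod.ext h2 h1
          subst heq
          exact ⟨(PySem.Set.contains_iff _ _).mpr hmem, hcond.1, hcond.2.1⟩
      · rintro ⟨hP, hy⟩
        exact Or.inr ⟨(y, c), (PySem.Set.contains_iff _ _).mp hP, ⟨hy.1, hy.2, hc.1, hc.2⟩, rfl, rfl⟩
  rw [PySem.List.foldl_congr_mem _ _ _ _ (fun m r hr => hrow m r hr)]
  exact PySem.List.foldl_congr_mem _ _ _ _ (fun m c hc => hcol m c hc)
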